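-- pv_equiv track=rewrite | github.com/Zaaachary/Python-Foundation-Suda | 04_历年复试真题/2020_判等差数列存在性.py | check
-- ===== SOURCE A (Python) =====
-- def check(L):
--     """
--     思路：将L排序 判断是否存在连续5个数相差为1
--     考试的时候完成的 缺少了去重
--     """
--     L.sort()    # 从小到大排序
--     for index in range(0, len(L)-4):
--         count = 0
--         for i in range(4):
--             # 判断index后的5个数是否依次满足关系
--             if L[index+i+1] - L[index+i] == 1:
--                 count += 1
--             else:
--                 count = 0
--                 break
--         if count == 4:
--             return True
--     return False
-- ===== SOURCE B (Python) =====
-- def check(L):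
--     L.sort()
--     run = 1
--     prev = None
--     for x in L:
--         if prev is not None and x - prev == 1:
--             run += 1
--             if run >= 5:
--                 return True
--         else:
--             run = 1
--         prev = x
--     return False
-- ===== Notes on version B (the rewrite author's own statement) =====
-- stated objective: simpler
-- what changed: Replaces A's nested loop that re-checks every overlapping 5-element window (with a count accumulator and break) by a single pass over the sorted list maintaining one running length of the current ascending-by-1 run, returning True the moment it reaches 5; both still sort L in place.
import Mathlib
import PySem

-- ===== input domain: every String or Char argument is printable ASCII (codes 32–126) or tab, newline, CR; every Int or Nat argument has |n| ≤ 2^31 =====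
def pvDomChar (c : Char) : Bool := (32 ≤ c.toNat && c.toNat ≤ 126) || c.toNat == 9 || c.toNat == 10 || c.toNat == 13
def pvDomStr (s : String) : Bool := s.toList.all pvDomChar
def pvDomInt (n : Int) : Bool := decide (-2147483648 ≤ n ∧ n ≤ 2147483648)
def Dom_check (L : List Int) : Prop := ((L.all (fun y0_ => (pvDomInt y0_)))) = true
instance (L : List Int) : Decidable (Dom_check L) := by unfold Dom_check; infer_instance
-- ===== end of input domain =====

-- B replaces A's re-check of every 5-element window by one running-run counter over the
-- sorted list (objective: simpler). Both A and B sort L in place in Python; the theorem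
-- below is about the RETURN value (the in-place sort is identical in both).

-- ===== PORT A =====
-- inner 'for i in range(4)' loop with its count accumulator and break (break returns 0,
-- as A sets count = 0 and breaks); indices are always in range, so pyGetD 0 is exact here
def checkInner (S : List Int) (index : Int) : List Int → Nat → Nat
  | [], count => count
  | i :: rest, count =>
    if PySem.List.pyGetD S (index + i + 1) 0 - PySem.List.pyGetD S (index + i) 0 == 1 then
      checkInner S index rest (count + 1)
    else 0

def check (L : List Int) : Bool :=
  let S := PySem.List.sorted L (fun x => x) false
  -- 'for index in range(0, len(L)-4): … if count == 4: return True' / 'return False'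
  (PySem.List.pyRange 0 ((S.length : Int) - 4) 1).any
    (fun index => checkInner S index (PySem.List.pyRange 0 4 1) 0 == 4)

-- ===== PORT B =====
-- the 'for x in L' loop of Source B with state (prev, run); returning true is the early return
def checkScan : Option Int → Nat → List Int → Bool
  | _, _, [] => false
  | prev, run, x :: xs =>
    match prev with
    | some p =>
      if x - p == 1 then
        (if run + 1 ≥ 5 then true else checkScan (some x) (run + 1) xs)
      else checkScan (some x) 1 xs
    | none => checkScan (some x) 1 xs

def check_alt (L : List Int) : Bool :=
  checkScan none 1 (PySem.List.sorted L (fun x => x) false)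

-- ===== PRECONDITION & SPEC =====
def Spec_check (L : List Int) (out : Bool) : Prop := out = check_alt L
instance (L : List Int) (out : Bool) : Decidable (Spec_check L out) := by unfold Spec_check; infer_instance

-- ===== CLAIM (what is proved, stated in full; the proofs are below) =====
def Claim_equal_check : Prop := ∀ (L : List Int), Dom_check L → Spec_check L (check L)

-- ===== LEMMAS AND PROOFS =====

-- common reference predicate: some 5 consecutive elements ascend by 1 each
def win4 : List Int → Bool
  | a :: b :: c :: d :: e :: rest =>
      (b - a == 1 && (c - b == 1 && (d - c == 1 && e - d == 1))) || win4 (b :: c :: d :: e :: rest)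
  | _ => false

-- the next k steps from p each ascend by 1
def upRun : Int → Nat → List Int → Bool
  | _, 0, _ => true
  | _, _ + 1, [] => false
  | p, k + 1, x :: xs => (x - p == 1) && upRun x k xs

theorem win4_short (S : List Int) (h : S.length < 5) : win4 S = false := by
  match S with
  | [] | [_] | [_,_] | [_,_,_] | [_,_,_,_] => rfl
  | _::_::_::_::_::_ => simp at h; omega

theorem win4_cons (p : Int) (xs : List Int) :
    win4 (p :: xs) = (upRun p 4 xs || win4 xs) := by
  rcases xs with _|⟨b,_|⟨c,_|⟨d,_|⟨e,rest⟩⟩⟩⟩ <;> simp [win4, upRun]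

theorem upRun_mono (xs : List Int) : ∀ (p : Int) (k k' : Nat), k' ≤ k →
    upRun p k xs = true → upRun p k' xs = true := by
  induction xs with
  | nil => intro p k k' hle h
           cases k' with
           | zero => rfl
           | succ j => cases k with
                       | zero => omega
                       | succ i => exact absurd h (by simp [upRun])
  | cons x xs ih =>
      intro p k k' hle h
      cases k' with
      | zero => rfl
      | succ j => cases k with
                  | zero => omega
                  | succ i =>
                      simp only [upRun, Bool.and_eq_true] at h ⊢
                      exact ⟨h.1, ih x i j (by omega) h.2⟩

theorem scan_eq (xs : List Int) : ∀ (p : Int) (r : Nat), 1 ≤ r → r ≤ 4 →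
    checkScan (some p) r xs = (upRun p (5 - r) xs || win4 (p :: xs)) := by
  induction xs with
  | nil =>
      intro p r h1 h4
      have h5 : 5 - r = (4 - r) + 1 := by omega
      rw [h5]
      simp [checkScan, upRun, win4]
  | cons x xs ih =>
      intro p r h1 h4
      have h5 : 5 - r = (4 - r) + 1 := by omega
      rw [win4_cons, h5]
      by_cases hc : (x - p == 1) = true
      · simp only [checkScan, hc, if_true, upRun, Bool.true_and]
        by_cases hr : r = 4
        · subst hr
          simp [upRun]
        · have hlt : ¬ (r + 1 ≥ 5) := by omega
          rw [if_neg hlt, ih x (r+1) (by omega) (by omega)]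
          have h6 : 5 - (r+1) = 4 - r := by omega
          rw [h6, win4_cons]
          cases h3 : upRun x 3 xs with
          | false => simp
          | true =>
              have : upRun x (4 - r) xs = true := upRun_mono xs x 3 (4-r) (by omega) h3
              simp [this]
      · simp only [Bool.not_eq_true] at hc
        simp only [checkScan, hc]
        rw [ih x 1 (by omega) (by omega), win4_cons]
        have h6 : (5 : Nat) - 1 = 4 := by norm_num
        rw [h6]
        cases h4' : upRun x 4 xs <;> simp [upRun, hc]

theorem scan_win4 (S : List Int) : checkScan none 1 S = win4 S := by
  cases S with
  | nil => rfl
  | cons x xs =>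
      show checkScan (some x) 1 xs = _
      rw [scan_eq xs x 1 (by omega) (by omega), win4_cons]
      cases h : upRun x 4 xs <;> simp

theorem pyGetD_cons_shift (a : Int) (xs : List Int) (i : Int) (h : 0 ≤ i) :
    PySem.List.pyGetD (a :: xs) (i + 1) 0 = PySem.List.pyGetD xs i 0 := by
  have hi : i = ((i.toNat : Nat) : Int) := by omega
  rw [hi]
  have h2 : ((i.toNat : Nat) : Int) + 1 = ((i.toNat + 1 : Nat) : Int) := by push_cast; ring
  rw [h2]
  simp only [PySem.List.pyGetD_natCast, List.getD_cons_succ]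

theorem inner_eq (S : List Int) (idx : Int) :
    (checkInner S idx (PySem.List.pyRange 0 4 1) 0 == 4)
      = (PySem.List.pyGetD S (idx + 1) 0 - PySem.List.pyGetD S idx 0 == 1
          && (PySem.List.pyGetD S (idx + 2) 0 - PySem.List.pyGetD S (idx + 1) 0 == 1
          && (PySem.List.pyGetD S (idx + 3) 0 - PySem.List.pyGetD S (idx + 2) 0 == 1
          && PySem.List.pyGetD S (idx + 4) 0 - PySem.List.pyGetD S (idx + 3) 0 == 1))) := by
  have h4 : PySem.List.pyRange 0 4 1 = [0, 1, 2, 3] := by decide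
  rw [h4]
  simp only [checkInner, add_zero,
    show idx + 1 + 1 = idx + 2 from by ring, show idx + 2 + 1 = idx + 3 from by ring,
    show idx + 3 + 1 = idx + 4 from by ring]
  split_ifs <;> simp_all

theorem shift_any (f : Int → Bool) (a b : Int) :
    (PySem.List.pyRange (a + 1) (b + 1) 1).any f
      = (PySem.List.pyRange a b 1).any (fun i => f (i + 1)) := by
  rw [PySem.List.pyRange_one, PySem.List.pyRange_one]
  have hd : b + 1 - (a + 1) = b - a := by ring
  rw [hd]
  simp only [List.any_map]
  congr 1
  funext k
  simp only [Function.comp]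
  congr 1
  ring

theorem any_congr_mem (l : List Int) (p q : Int → Bool) (h : ∀ x ∈ l, p x = q x) :
    l.any p = l.any q := by
  induction l with
  | nil => rfl
  | cons x xs ih =>
      simp only [List.any_cons, h x (by simp)]
      rw [ih (fun y hy => h y (by simp [hy]))]

theorem outer_win4 (S : List Int) :
    (PySem.List.pyRange 0 ((S.length : Int) - 4) 1).any
      (fun index => checkInner S index (PySem.List.pyRange 0 4 1) 0 == 4) = win4 S := by
  induction S with
  | nil => rw [PySem.List.pyRange_one_eq_nil (by norm_num)]; rfl
  | cons a S' ih =>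
    by_cases h : 4 ≤ S'.length
    · -- long case
      have hb : (0:Int) < (((a :: S').length : Int) - 4) := by simp; omega
      rw [PySem.List.pyRange_one_cons hb]
      simp only [List.any_cons]
      have hlen : (((a :: S').length : Int) - 4) = ((S'.length : Int) - 4) + 1 := by
        simp; ring
      have htail :
          (PySem.List.pyRange (0 + 1) (((S'.length : Int) - 4) + 1) 1).any
              (fun index => checkInner (a :: S') index (PySem.List.pyRange 0 4 1) 0 == 4)
            = (PySem.List.pyRange 0 ((S'.length : Int) - 4) 1).any
              (fun i => checkInner (a :: S') (i + 1) (PySem.List.pyRange 0 4 1) 0 == 4) := by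
        have := shift_any
          (fun index => checkInner (a :: S') index (PySem.List.pyRange 0 4 1) 0 == 4)
          0 ((S'.length : Int) - 4)
        simpa using this
      rw [hlen, htail]
      have hcong :
          (PySem.List.pyRange 0 ((S'.length : Int) - 4) 1).any
              (fun i => checkInner (a :: S') (i + 1) (PySem.List.pyRange 0 4 1) 0 == 4)
            = (PySem.List.pyRange 0 ((S'.length : Int) - 4) 1).any
              (fun index => checkInner S' index (PySem.List.pyRange 0 4 1) 0 == 4) := by
        apply any_congr_mem
        intro idx hmem
        have h0 : 0 ≤ idx := ((PySem.List.mem_pyRange_one).1 hmem).1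
        rw [inner_eq, inner_eq]
        rw [show idx + 1 + 1 = (idx + 1) + 1 from rfl,
            show idx + 1 + 2 = (idx + 2) + 1 from by ring,
            show idx + 1 + 3 = (idx + 3) + 1 from by ring,
            show idx + 1 + 4 = (idx + 4) + 1 from by ring]
        rw [pyGetD_cons_shift a S' idx h0,
            pyGetD_cons_shift a S' (idx + 1) (by omega),
            pyGetD_cons_shift a S' (idx + 2) (by omega),
            pyGetD_cons_shift a S' (idx + 3) (by omega),
            pyGetD_cons_shift a S' (idx + 4) (by omega)]
      rw [hcong, ih]
      -- head window
      rcases S' with _|⟨b, _|⟨c, _|⟨d, _|⟨e, r⟩⟩⟩⟩ <;> simp at h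
      rw [inner_eq]
      have e0 : PySem.List.pyGetD (a :: b :: c :: d :: e :: r) (0:Int) 0 = a := by
        simp [PySem.List.pyGetD_zero_cons]
      have e1 : PySem.List.pyGetD (a :: b :: c :: d :: e :: r) ((0:Int) + 1) 0 = b := by
        rw [pyGetD_cons_shift _ _ 0 (by omega)]; simp [PySem.List.pyGetD_zero_cons]
      have e2 : PySem.List.pyGetD (a :: b :: c :: d :: e :: r) ((0:Int) + 2) 0 = c := by
        rw [show (0:Int) + 2 = 1 + 1 from by ring, pyGetD_cons_shift _ _ 1 (by omega),
            show (1:Int) = 0 + 1 from by ring, pyGetD_cons_shift _ _ 0 (by omega)]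
        simp [PySem.List.pyGetD_zero_cons]
      have e3 : PySem.List.pyGetD (a :: b :: c :: d :: e :: r) ((0:Int) + 3) 0 = d := by
        rw [show (0:Int) + 3 = 2 + 1 from by ring, pyGetD_cons_shift _ _ 2 (by omega),
            show (2:Int) = 1 + 1 from by ring, pyGetD_cons_shift _ _ 1 (by omega),
            show (1:Int) = 0 + 1 from by ring, pyGetD_cons_shift _ _ 0 (by omega)]
        simp [PySem.List.pyGetD_zero_cons]
      have e4 : PySem.List.pyGetD (a :: b :: c :: d :: e :: r) ((0:Int) + 4) 0 = e := by
        rw [show (0:Int) + 4 = 3 + 1 from by ring, pyGetD_cons_shift _ _ 3 (by omega),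
            show (3:Int) = 2 + 1 from by ring, pyGetD_cons_shift _ _ 2 (by omega),
            show (2:Int) = 1 + 1 from by ring, pyGetD_cons_shift _ _ 1 (by omega),
            show (1:Int) = 0 + 1 from by ring, pyGetD_cons_shift _ _ 0 (by omega)]
        simp [PySem.List.pyGetD_zero_cons]
      rw [e0, e1, e2, e3, e4]
      simp [win4]
    · -- short case: no window of 5 exists
      rw [PySem.List.pyRange_one_eq_nil (by simp; omega)]
      rw [win4_short _ (by simp; omega)]
      rfl

-- ===== VERDICT (by name: the statement is the Claim_ definition above) =====
theorem check_spec : Claim_equal_check := by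
  intro L _
  unfold Spec_check check check_alt
  rw [scan_win4]
  exact outer_win4 _
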